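-- pv_equiv track=rewrite | github.com/Barreleyes/Excel2Lua | templete/lua-LAPTOP-VENA31LC.py | array_number
-- ===== SOURCE A (Python) =====
-- ARRAY_SPLITER_D1='|'
--
-- ARRAY_SPLITER_D2=';'
--
-- def var_number(data):
--     return data
--
-- def array_number(data):
--     output=''
--     for i in data.split(ARRAY_SPLITER_D1):
--         element=''
--         for j in i.split(ARRAY_SPLITER_D2):
--             element+=str(var_number(j)) + ','
--         output+='{'+element[:-1] +'},'
--     return '{' + output[:-1] + '}'
-- ===== SOURCE B (Python) =====
-- ARRAY_SPLITER_D1 = '|'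
-- ARRAY_SPLITER_D2 = ';'
--
-- def array_number(data):
--     return '{{' + data.replace(ARRAY_SPLITER_D2, ',').replace(ARRAY_SPLITER_D1, '},{') + '}}'
-- ===== Notes on version B (the rewrite author's own statement) =====
-- stated objective: simpler
-- what changed: Replaces the nested split/accumulate loops with two global string substitutions (';'->',', '|'->'},{') wrapped in double braces, exploiting that var_number is the identity.
import Mathlib
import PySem

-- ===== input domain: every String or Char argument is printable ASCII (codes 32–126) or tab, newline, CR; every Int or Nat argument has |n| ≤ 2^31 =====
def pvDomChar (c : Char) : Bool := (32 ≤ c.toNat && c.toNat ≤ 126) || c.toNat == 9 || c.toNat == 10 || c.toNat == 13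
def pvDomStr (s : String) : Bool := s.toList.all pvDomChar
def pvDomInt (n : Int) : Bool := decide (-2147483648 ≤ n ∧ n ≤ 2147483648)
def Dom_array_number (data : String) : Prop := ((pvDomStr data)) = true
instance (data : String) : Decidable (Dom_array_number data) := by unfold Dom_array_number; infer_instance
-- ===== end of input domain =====

-- B builds the Lua literal by two global substitutions instead of A's nested split/accumulate loops (objective: simpler).

-- ===== PORT A =====
-- module constants ARRAY_SPLITER_D1 = '|' and ARRAY_SPLITER_D2 = ';' appear as the literal separators
def var_number (data : List Char) : List Char := data

-- literal port of A's nested loops; string work is done on List Char via PySem.Chars (exact)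
def array_number (data : String) : String :=
  let output : List Char :=
    (PySem.Chars.splitOn data.toList ['|']).foldl (fun output i =>
      let element : List Char :=
        (PySem.Chars.splitOn i [';']).foldl (fun element j =>
          element ++ (var_number j ++ [','])) []
      output ++ (['{'] ++ PySem.Chars.slice element none (some (-1)) ++ ['}', ','])) []
  String.ofList (['{'] ++ PySem.Chars.slice output none (some (-1)) ++ ['}'])

-- ===== PORT B =====
-- literal port of Source B: '{{' + data.replace(';', ',').replace('|', '},{') + '}}'
def array_number_alt (data : String) : String :=
  String.ofList (['{', '{'] ++
    PySem.Chars.replace (PySem.Chars.replace data.toList [';'] [',']) ['|'] ['}', ',', '{'] ++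
    ['}', '}'])

-- ===== PRECONDITION & SPEC =====
def Spec_array_number (data : String) (out : String) : Prop := out = array_number_alt data
instance (data : String) (out : String) : Decidable (Spec_array_number data out) := by unfold Spec_array_number; infer_instance

-- ===== CLAIM (what is proved, stated in full; the proofs are below) =====
def Claim_equal_array_number : Prop := ∀ (data : String), Dom_array_number data → Spec_array_number data (array_number data)

-- ===== LEMMAS AND PROOFS =====

theorem intercalate_cons_ne (sep a : List Char) (L : List (List Char)) (h : L ≠ []) :
    List.intercalate sep (a :: L) = a ++ sep ++ List.intercalate sep L := by
  cases L with
  | nil => simp at h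
  | cons b M => simp [List.intercalate]

-- reference single-character splitter used only by the proofs
def splitc (o : Char) : List Char → List (List Char)
  | [] => [[]]
  | c :: t => if c = o then [] :: splitc o t else List.modifyHead (c :: ·) (splitc o t)

-- reference single-character replacer used only by the proofs
def repl1 (o : Char) (new : List Char) (l : List Char) : List Char :=
  l.flatMap (fun c => if c = o then new else [c])

theorem splitc_ne_nil (o : Char) (l : List Char) : splitc o l ≠ [] := by
  induction l with
  | nil => simp [splitc]
  | cons c t ih =>
    simp only [splitc]
    split
    · simp
    · cases h : splitc o t with
      | nil => exact absurd h ih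
      | cons p ps => simp

theorem splitOn_go_eq (o : Char) :
    ∀ (fuel : Nat) (l cur : List Char) (accs : List (List Char)), l.length < fuel →
      PySem.Chars.splitOn.go [o] fuel l cur accs =
        accs.reverse ++ List.modifyHead (cur.reverse ++ ·) (splitc o l) := by
  intro fuel
  induction fuel with
  | zero => intro l cur accs h; omega
  | succ n ih =>
    intro l cur accs h
    cases l with
    | nil => simp [PySem.Chars.splitOn.go, splitc]
    | cons c t =>
      simp only [PySem.Chars.splitOn.go]
      by_cases hc : c = o
      · subst hc
        simp only [List.isPrefixOf, BEq.rfl, Bool.true_and, if_true, List.length_cons,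
          List.length_nil, Nat.zero_add, List.drop_succ_cons, List.drop_zero]
        rw [ih t _ _ (by simpa using Nat.lt_of_succ_lt_succ h)]
        cases hs : splitc c t <;> simp [splitc, hs]
      · have hp : ([o].isPrefixOf (c :: t)) = false := by
          simp [List.isPrefixOf]; exact fun h' => absurd h'.symm hc
        rw [hp]
        simp only [Bool.false_eq_true, if_false]
        rw [ih t _ _ (by simpa using Nat.lt_of_succ_lt_succ h)]
        cases hs : splitc o t <;> simp [splitc, hs, hc]

theorem splitOn_single (o : Char) (l : List Char) :
    PySem.Chars.splitOn l [o] = splitc o l := by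
  rw [PySem.Chars.splitOn, splitOn_go_eq o (l.length + 1) l [] [] (by omega)]
  cases hs : splitc o l with
  | nil => exact absurd hs (splitc_ne_nil o l)
  | cons p ps => simp

theorem replace_go_eq (o : Char) (new : List Char) :
    ∀ (fuel : Nat) (l acc : List Char), l.length ≤ fuel →
      PySem.Chars.replace.go [o] new fuel l acc = acc.reverse ++ repl1 o new l := by
  intro fuel
  induction fuel with
  | zero =>
    intro l acc h
    have : l = [] := by cases l <;> simp_all
    subst this
    simp [PySem.Chars.replace.go, repl1]
  | succ n ih =>
    intro l acc h
    cases l with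
    | nil => simp [PySem.Chars.replace.go, repl1]
    | cons c t =>
      simp only [PySem.Chars.replace.go]
      by_cases hc : c = o
      · subst hc
        simp only [List.isPrefixOf, BEq.rfl, Bool.true_and, if_true, List.length_cons,
          List.length_nil, Nat.zero_add, List.drop_succ_cons, List.drop_zero]
        rw [ih t _ (by simpa using Nat.le_of_succ_le_succ h)]
        simp [repl1]
      · have hp : ([o].isPrefixOf (c :: t)) = false := by
          simp [List.isPrefixOf]; exact fun h' => absurd h'.symm hc
        rw [hp]
        simp only [Bool.false_eq_true, if_false]
        rw [ih t _ (by simpa using Nat.le_of_succ_le_succ h)]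
        simp [repl1, hc]

theorem replace_single (o : Char) (new l : List Char) :
    PySem.Chars.replace l [o] new = repl1 o new l := by
  rw [PySem.Chars.replace]
  simp only [List.isEmpty_cons, Bool.false_eq_true, if_false]
  simpa using replace_go_eq o new l.length l [] (le_refl _)

-- dropping the trailing comma of a comma-terminated concatenation yields the comma-join
theorem dropLast_flatMap_comma (ps : List (List Char)) (h : ps ≠ []) :
    (ps.flatMap (fun p => p ++ [','])).dropLast = List.intercalate [','] ps := by
  induction ps with
  | nil => simp at h
  | cons p qs ih =>
    cases qs with
    | nil => simp [List.intercalate]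
    | cons q rs =>
      have hne : ((q :: rs).flatMap (fun p => p ++ [','])) ≠ [] := by simp
      rw [List.flatMap_cons, List.dropLast_append_of_ne_nil hne, ih (by simp),
        intercalate_cons_ne [','] p (q :: rs) (by simp)]

-- join sep (split o l) = replace o sep l
theorem intercalate_splitc (o : Char) (sep l : List Char) :
    List.intercalate sep (splitc o l) = repl1 o sep l := by
  induction l with
  | nil => simp [splitc, repl1, List.intercalate]
  | cons c t ih =>
    simp only [splitc]
    by_cases hc : c = o
    · subst hc
      rw [if_pos rfl, intercalate_cons_ne _ _ _ (splitc_ne_nil c t), ih]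
      simp [repl1]
    · rw [if_neg hc]
      cases hs : splitc o t with
      | nil => exact absurd hs (splitc_ne_nil o t)
      | cons p ps =>
        rw [hs] at ih
        cases ps with
        | nil => simp_all [List.intercalate, repl1]
        | cons q qs =>
          simp only [List.modifyHead_cons,
            intercalate_cons_ne _ _ _ (by simp : (q :: qs) ≠ []), List.cons_append,
            List.append_assoc] at ih ⊢
          rw [ih]
          simp [repl1, hc]

-- replacing ';' commutes with splitting at '|'
theorem splitc_repl1_comm (l : List Char) :
    splitc '|' (repl1 ';' [','] l) = (splitc '|' l).map (repl1 ';' [',']) := by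
  induction l with
  | nil => simp [splitc, repl1]
  | cons c t ih =>
    by_cases hc : c = ';'
    · subst hc
      have hr : repl1 ';' [','] (';' :: t) = ',' :: repl1 ';' [','] t := by simp [repl1]
      rw [hr]
      simp only [splitc, if_neg (by decide : ¬(',' : Char) = '|'),
        if_neg (by decide : ¬(';' : Char) = '|'), ih]
      cases hs : splitc '|' t with
      | nil => exact absurd hs (splitc_ne_nil _ t)
      | cons p ps => simp [repl1]
    · have hr : repl1 ';' [','] (c :: t) = c :: repl1 ';' [','] t := by simp [repl1, hc]
      rw [hr]
      by_cases hb : c = '|'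
      · subst hb
        simp only [splitc, ih]
        simp [repl1]
      · simp only [splitc, if_neg hb, ih]
        cases hs : splitc '|' t with
        | nil => exact absurd hs (splitc_ne_nil _ t)
        | cons p ps => simp [repl1, hc]

-- braces distribute over the comma-join
theorem intercalate_braces (L : List (List Char)) (h : L ≠ []) :
    List.intercalate [','] (L.map (fun i => '{' :: i ++ ['}'])) =
      '{' :: List.intercalate ['}', ',', '{'] L ++ ['}'] := by
  induction L with
  | nil => simp at h
  | cons p qs ih =>
    cases qs with
    | nil => simp [List.intercalate]
    | cons q rs =>
      rw [List.map_cons, intercalate_cons_ne [','] _ _ (by simp), ih (by simp),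
        intercalate_cons_ne ['}', ',', '{'] p (q :: rs) (by simp)]
      simp

-- ===== VERDICT (by name: the statement is the Claim_ definition above) =====
theorem array_number_spec : Claim_equal_array_number := by
  intro data _
  unfold Spec_array_number array_number array_number_alt var_number
  simp only [splitOn_single, replace_single, PySem.Chars.slice, PySem.List.slice_to_neg_one,
    PySem.List.foldl_append_eq_flatMap, List.nil_append]
  have inner : (fun x => ['{'] ++ (List.flatMap (fun x => x ++ [',']) (splitc ';' x)).dropLast ++ ['}', ','])
      = (fun x => ('{' :: repl1 ';' [','] x ++ ['}']) ++ [',']) := by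
    funext i
    rw [dropLast_flatMap_comma _ (splitc_ne_nil ';' i), intercalate_splitc]
    simp
  rw [inner,
    ← List.flatMap_map (fun x => '{' :: repl1 ';' [','] x ++ ['}']) (fun p => p ++ [','])
      (splitc '|' data.toList),
    dropLast_flatMap_comma _ (by simpa using splitc_ne_nil '|' data.toList),
    show (fun x => '{' :: repl1 ';' [','] x ++ ['}'])
        = ((fun i => '{' :: i ++ ['}']) ∘ (repl1 ';' [','])) from rfl,
    ← List.map_map,
    intercalate_braces _ (by simpa using splitc_ne_nil '|' data.toList),
    ← splitc_repl1_comm, intercalate_splitc]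
  simp
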